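-- pv_equiv track=rewrite | github.com/c-h-russell-walker/advent-of-code-2016 | day-7/palindromes.py | check_for_palindrome
-- ===== SOURCE A (Python) =====
-- def check_for_palindrome(word):
--     """
--         For sake of puzzle we consider consecutive letters not a palindrome
--         e.g. `aaaa`
--         Also we assume palindrome of four characters
--     """
--
--     for i in range(1, len(word)):
--         # Positive example: `abba`
--         # Negative example: `aaaa`
--         try:
--             # if next equals current
--             if word[i] == word[i+1]:
--                 # check if previous equals two places from current and all four aren't same
--                 if word[i-1] == word[i+2] and word[i-1] != word[i]:
--                     return True
--         except IndexError:
--             return False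
--     return False
-- ===== SOURCE B (Python) =====
-- def check_for_palindrome(word):
--     # Run-length encode the string into (char, count) runs; an ABBA exists
--     # iff some run has count exactly 2 and its two neighbouring runs share a char
--     # (adjacent runs differ, so the a != b condition is automatic).
--     runs = []
--     for ch in word:
--         if runs and runs[-1][0] == ch:
--             runs[-1] = (ch, runs[-1][1] + 1)
--         else:
--             runs.append((ch, 1))
--     return any(b == 2 and x == z
--                for (x, _), (_, b), (z, _) in zip(runs, runs[1:], runs[2:]))
-- ===== Notes on version B (the rewrite author's own statement) =====
-- stated objective: alternative
-- what changed: Replaced the positional four-character probe with try/except by run-length encoding the string and scanning run triples: ABBA exists iff a run of length exactly 2 is flanked by runs with the same character.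
import Mathlib
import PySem

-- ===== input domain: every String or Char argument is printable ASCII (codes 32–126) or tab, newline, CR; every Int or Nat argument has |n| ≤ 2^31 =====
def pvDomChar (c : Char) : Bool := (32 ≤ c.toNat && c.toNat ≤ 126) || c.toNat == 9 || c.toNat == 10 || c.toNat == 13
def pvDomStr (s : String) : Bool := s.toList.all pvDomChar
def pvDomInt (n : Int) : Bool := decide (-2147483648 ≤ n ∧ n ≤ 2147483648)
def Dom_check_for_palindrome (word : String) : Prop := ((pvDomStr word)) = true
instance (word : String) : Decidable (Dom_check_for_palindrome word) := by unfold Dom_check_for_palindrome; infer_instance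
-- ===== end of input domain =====

-- B replaces A's positional four-character probe by run-length encoding plus a scan of
-- run triples (a run of length exactly 2 flanked by runs sharing a char); same cost, different algorithm.

-- ===== PORT A =====
-- for i in range(1, len(word)): indexing with word[i±…]; IndexError (pyGet? = none) returns False
def pvALoop (w : List Char) : List Int → Bool
  | [] => false
  | i :: rest =>
    match PySem.List.pyGet? w i, PySem.List.pyGet? w (i + 1) with
    | some ci, some ci1 =>
      if ci == ci1 then
        match PySem.List.pyGet? w (i - 1), PySem.List.pyGet? w (i + 2) with
        | some cm, some cp => if cm == cp && cm != ci then true else pvALoop w rest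
        | _, _ => false      -- IndexError on word[i+2] inside the try → return False
      else pvALoop w rest
    | _, _ => false          -- IndexError on word[i+1] inside the try → return False

def check_for_palindrome (word : String) : Bool :=
  pvALoop word.toList (PySem.List.pyRange 1 (word.toList.length : Int) 1)

-- ===== PORT B =====
-- loop body: if runs and runs[-1][0] == ch: runs[-1] = (ch, runs[-1][1] + 1) else runs.append((ch, 1))
def pvRleStep (runs : List (Char × Int)) (ch : Char) : List (Char × Int) :=
  match runs.getLast? with
  | some (c, n) => if c == ch then runs.dropLast ++ [(ch, n + 1)] else runs ++ [(ch, 1)]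
  | none => runs ++ [(ch, 1)]

-- any(b == 2 and x == z for (x, _), (_, b), (z, _) in zip(runs, runs[1:], runs[2:]))
def pvScan : List (Char × Int) → Bool
  | (x, _) :: (y, b) :: (z, m) :: rest => (b == 2 && x == z) || pvScan ((y, b) :: (z, m) :: rest)
  | _ => false

def check_for_palindrome_alt (word : String) : Bool :=
  pvScan (word.toList.foldl pvRleStep [])

-- ===== PRECONDITION & SPEC =====
def Spec_check_for_palindrome (word : String) (out : Bool) : Prop := out = check_for_palindrome_alt word
instance (word : String) (out : Bool) : Decidable (Spec_check_for_palindrome word out) := by unfold Spec_check_for_palindrome; infer_instance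

-- ===== CLAIM (what is proved, stated in full; the proofs are below) =====
def Claim_equal_check_for_palindrome : Prop := ∀ (word : String), Dom_check_for_palindrome word → Spec_check_for_palindrome word (check_for_palindrome word)

-- ===== LEMMAS AND PROOFS =====

-- proof-layer sliding-window characterisation of A
def pvWin (cs : List Char) : Bool :=
  match cs with
  | a :: b :: c :: d :: rest => (a == d && b == c && a != b) || pvWin (b :: c :: d :: rest)
  | _ => false

lemma pvWin_short (cs : List Char) (h : cs.length < 4) : pvWin cs = false := by
  match cs, h with
  | [], _ => rfl
  | [_], _ => rfl
  | [_, _], _ => rfl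
  | [_, _, _], _ => rfl
  | _ :: _ :: _ :: _ :: _, h => simp at h; omega

lemma pv_key (w : List Char) : ∀ m k : Nat, w.length - k ≤ m →
    pvALoop w (PySem.List.pyRange ((k : Int) + 1) (w.length : Int) 1) = pvWin (w.drop k) := by
  intro m
  induction m with
  | zero =>
    intro k hk
    have hlen : w.length ≤ k := by omega
    have hempty : PySem.List.pyRange ((k : Int) + 1) (w.length : Int) 1 = [] := by
      simp [PySem.List.pyRange_one]
      omega
    rw [hempty, List.drop_of_length_le hlen]
    rfl
  | succ m ih =>
    intro k hk
    by_cases hlt : (k : Int) + 1 < (w.length : Int)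
    · have hk1 : k + 1 < w.length := by exact_mod_cast hlt
      rw [PySem.List.pyRange_one_cons hlt]
      have hk0 : k < w.length := by omega
      have hdk : w.drop k = w[k] :: w.drop (k + 1) := List.drop_eq_getElem_cons hk0
      have hdk1 : w.drop (k + 1) = w[k + 1] :: w.drop (k + 2) := List.drop_eq_getElem_cons hk1
      have hih : pvALoop w (PySem.List.pyRange (((k + 1 : Nat) : Int) + 1) (w.length : Int) 1)
          = pvWin (w.drop (k + 1)) := ih (k + 1) (by omega)
      have hcast : ((k : Int) + 1) + 1 = (((k + 1 : Nat) : Int) + 1) := by push_cast; ring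
      have e1 : PySem.List.pyGet? w ((k : Int) + 1) = w[k + 1]? := by
        rw [show (k : Int) + 1 = ((k + 1 : Nat) : Int) by push_cast; ring, PySem.List.pyGet?_natCast]
      have e2 : PySem.List.pyGet? w (((k : Int) + 1) + 1) = w[k + 2]? := by
        rw [show ((k : Int) + 1) + 1 = ((k + 2 : Nat) : Int) by push_cast; ring, PySem.List.pyGet?_natCast]
      have e3 : PySem.List.pyGet? w (((k : Int) + 1) - 1) = w[k]? := by
        rw [show ((k : Int) + 1) - 1 = ((k : Nat) : Int) by ring, PySem.List.pyGet?_natCast]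
      have e4 : PySem.List.pyGet? w (((k : Int) + 1) + 2) = w[k + 3]? := by
        rw [show ((k : Int) + 1) + 2 = ((k + 3 : Nat) : Int) by push_cast; ring, PySem.List.pyGet?_natCast]
      rw [pvALoop, e1, e2, e3, e4, hcast, hih]
      have hb1 : w[k + 1]? = some w[k + 1] := List.getElem?_eq_getElem hk1
      have ha : w[k]? = some w[k] := List.getElem?_eq_getElem hk0
      by_cases h2 : k + 2 < w.length
      · have hc : w[k + 2]? = some w[k + 2] := List.getElem?_eq_getElem h2
        have hdk2 : w.drop (k + 2) = w[k + 2] :: w.drop (k + 3) := List.drop_eq_getElem_cons h2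
        by_cases h3 : k + 3 < w.length
        · have hd : w[k + 3]? = some w[k + 3] := List.getElem?_eq_getElem h3
          have hdk3 : w.drop (k + 3) = w[k + 3] :: w.drop (k + 4) := List.drop_eq_getElem_cons h3
          rw [hb1, hc, ha, hd, hdk, hdk1, hdk2, hdk3, pvWin]
          cases hbc : (w[k + 1] == w[k + 2]) <;>
            cases had : (w[k] == w[k + 3]) <;>
              cases hne : (w[k] == w[k + 1]) <;>
                simp [hbc, had, hne, bne]
        · have hd : w[k + 3]? = none := by
            rw [List.getElem?_eq_none_iff]; omega
          have hlen3 : w.length = k + 3 := by omega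
          have hshort : pvWin (w.drop (k + 1)) = false := by
            apply pvWin_short; simp [hlen3]
          have hshort0 : pvWin (w.drop k) = false := by
            apply pvWin_short; simp [hlen3]
          rw [hb1, hc, ha, hd, hshort, hshort0]
          cases hbc : (w[k + 1] == w[k + 2]) <;> simp [hbc]
      · have hc : w[k + 2]? = none := by rw [List.getElem?_eq_none_iff]; omega
        have hlen2 : w.length = k + 2 := by omega
        rw [hb1, hc, pvWin_short (w.drop k) (by rw [List.length_drop, hlen2]; omega)]
    · have hempty : PySem.List.pyRange ((k : Int) + 1) (w.length : Int) 1 = [] := by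
        simp [PySem.List.pyRange_one]
        omega
      have hlen : w.length ≤ k + 1 := by omega
      rw [hempty, pvWin_short _ (by simp; omega)]
      rfl

-- proof-layer front-to-back run-length encoding
def pvRleAux : Char → Int → List Char → List (Char × Int)
  | c, n, [] => [(c, n)]
  | c, n, x :: xs => if x == c then pvRleAux c (n + 1) xs else (c, n) :: pvRleAux x 1 xs

lemma pvRleAux_head : ∀ (t : List Char) (c : Char) (n : Int),
    ∃ m rest, pvRleAux c n t = (c, m) :: rest ∧ n ≤ m := by
  intro t
  induction t with
  | nil => intro c n; exact ⟨n, [], rfl, le_refl n⟩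
  | cons x t ih =>
    intro c n
    by_cases hx : x == c
    · have hx' : x = c := by simpa using hx
      obtain ⟨m, rest, hm, hle⟩ := ih c (n + 1)
      exact ⟨m, rest, by simp [pvRleAux, hx', hm], by omega⟩
    · exact ⟨n, pvRleAux x 1 t, by simp [pvRleAux, hx], le_refl n⟩

lemma pvFold : ∀ (xs : List Char) (pre : List (Char × Int)) (c : Char) (n : Int),
    List.foldl pvRleStep (pre ++ [(c, n)]) xs = pre ++ pvRleAux c n xs := by
  intro xs
  induction xs with
  | nil => intro pre c n; simp [pvRleAux]
  | cons x t ih =>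
    intro pre c n
    rw [List.foldl_cons]
    by_cases hx : x == c
    · have hx' : x = c := by simpa using hx
      have hstep : pvRleStep (pre ++ [(c, n)]) x = pre ++ [(c, n + 1)] := by
        simp [pvRleStep, hx']
      rw [hstep, ih pre c (n + 1)]
      simp [pvRleAux, hx']
    · have hcx : (c == x) = false := by
        simp only [beq_eq_false_iff_ne]; intro h; exact hx (by simp [h])
      have hstep : pvRleStep (pre ++ [(c, n)]) x = (pre ++ [(c, n)]) ++ [(x, 1)] := by
        simp [pvRleStep, hcx]
      rw [hstep, ih (pre ++ [(c, n)]) x 1]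
      simp [pvRleAux, hx]

lemma pvW1 (c : Char) (xs : List Char) : pvWin (c :: c :: xs) = pvWin (c :: xs) := by
  match xs with
  | [] => rfl
  | [x2] => rfl
  | x2 :: x3 :: t =>
    show ((c == x3 && c == x2 && c != c) || pvWin (c :: x2 :: x3 :: t)) = pvWin (c :: x2 :: x3 :: t)
    simp

lemma pvK : ∀ (xs : List Char) (c : Char) (n : Int),
    pvWin (c :: xs) = pvScan (pvRleAux c n xs) := by
  intro xs
  induction xs with
  | nil => intro c n; rfl
  | cons x t ih =>
    intro c n
    by_cases hx : x == c
    · have hx' : x = c := by simpa using hx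
      rw [hx', pvW1, ih c (n + 1)]
      simp [pvRleAux]
    · have hxc : (x == c) = false := by simpa using hx
      have hcx : (c == x) = false := by
        simp only [beq_eq_false_iff_ne] at hxc ⊢; exact fun h => hxc h.symm
      rw [show pvRleAux c n (x :: t) = (c, n) :: pvRleAux x 1 t by simp [pvRleAux, hxc]]
      match t with
      | [] => simp [pvWin, pvRleAux, pvScan]
      | [x2] =>
        by_cases h2 : x2 == x
        · have h2' : x2 = x := by simpa using h2
          rw [h2']
          simp [pvWin, pvRleAux, pvScan]
        · have h2f : (x2 == x) = false := by simpa using h2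
          simp [pvWin, pvRleAux, h2f, pvScan]
      | x2 :: x3 :: t' =>
        have hexp : pvWin (c :: x :: x2 :: x3 :: t')
            = ((c == x3 && x == x2 && c != x) || pvWin (x :: x2 :: x3 :: t')) := rfl
        rw [hexp, ih x 1]
        by_cases h2 : x2 == x
        · have h2' : x2 = x := by simpa using h2
          rw [h2']
          rw [show pvRleAux x 1 (x :: x3 :: t') = pvRleAux x 2 (x3 :: t') by simp [pvRleAux]]
          by_cases h3 : x3 == x
          · have h3' : x3 = x := by simpa using h3
            rw [h3']
            rw [show pvRleAux x 2 (x :: t') = pvRleAux x 3 t' by simp [pvRleAux]]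
            obtain ⟨m, rest, hm, hle⟩ := pvRleAux_head t' x 3
            have hm2 : (m == (2 : Int)) = false := by
              simp only [beq_eq_false_iff_ne]; omega
            rw [hm]
            match rest with
            | [] => simp [pvScan, hcx]
            | (z, k) :: rest2 => simp [pvScan, hm2, hcx]
          · have h3f : (x3 == x) = false := by simpa using h3
            rw [show pvRleAux x 2 (x3 :: t') = (x, 2) :: pvRleAux x3 1 t' by simp [pvRleAux, h3f]]
            obtain ⟨m, rest, hm, _⟩ := pvRleAux_head t' x3 1
            rw [hm]
            simp [pvScan, bne, hcx]
        · have h2f : (x2 == x) = false := by simpa using h2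
          have hx2f : (x == x2) = false := by
            simp only [beq_eq_false_iff_ne] at h2f ⊢; exact fun h => h2f h.symm
          rw [show pvRleAux x 1 (x2 :: x3 :: t') = (x, 1) :: pvRleAux x2 1 (x3 :: t') by
            simp [pvRleAux, h2f]]
          obtain ⟨m, rest, hm, _⟩ := pvRleAux_head (x3 :: t') x2 1
          rw [hm]
          simp [pvScan, hx2f]

lemma pvAlt_eq (w : List Char) : pvScan (List.foldl pvRleStep [] w) = pvWin w := by
  match w with
  | [] => rfl
  | c :: t =>
    have hstep : pvRleStep [] c = [] ++ [(c, 1)] := by simp [pvRleStep]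
    rw [List.foldl_cons, hstep, pvFold t [] c 1]
    simp only [List.nil_append]
    exact (pvK t c 1).symm

-- ===== VERDICT (by name: the statement is the Claim_ definition above) =====
theorem check_for_palindrome_spec : Claim_equal_check_for_palindrome := by
  intro word _
  unfold Spec_check_for_palindrome check_for_palindrome check_for_palindrome_alt
  rw [pvAlt_eq]
  have h := pv_key word.toList word.toList.length 0 (by omega)
  simpa using h
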